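-- pv_equiv track=rewrite | github.com/katchinsky/reflux-tg-bot | scripts/analyze_taxonomy.py | find_roots
-- ===== SOURCE A (Python) =====
-- from typing import Any, DefaultDict, Dict, Iterable, List, Optional, Set, Tuple
--
-- def find_roots(parent_map: Dict[str, Set[str]], all_nodes: Set[str]) -> Tuple[Set[str], int]:
--     """
--     Root is defined as:
--       - node with no known parents in the taxonomy, OR
--       - all its parents are missing from the taxonomy file (external parent)
--
--     Returns (roots, missing_parent_links)
--     """
--     roots: Set[str] = set()
--     missing_parent_links = 0
--
--     for node, parents in parent_map.items():
--         if not parents: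
--             roots.add(node)
--             continue
--         present_parents = {p for p in parents if p in all_nodes}
--         missing_parent_links += len(parents) - len(present_parents)
--         if not present_parents:
--             roots.add(node)
--
--     return roots, missing_parent_links
-- ===== SOURCE B (Python) =====
-- def find_roots(parent_map, all_nodes):
--     """Edge-centric: classify each parent link once; any node owning a present
--     link is a non-root, and roots are the complement among the keys."""
--     edges = [(node, parent in all_nodes)
--              for node, parents in parent_map.items() for parent in parents]
--     non_roots = {node for node, present in edges if present}
--     missing_parent_links = sum(1 for _, present in edges if not present)
--     return set(parent_map) - non_roots, missing_parent_links
-- ===== Notes on version B (the rewrite author's own statement) =====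
-- stated objective: alternative
-- what changed: Replaces A's per-node loop (per-node present_parents set, root test per node) by an edge-centric algorithm: every parent link is classified once into present/absent, non-roots are the owners of present links, and roots are obtained as the set-complement of the keys.
import Mathlib
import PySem

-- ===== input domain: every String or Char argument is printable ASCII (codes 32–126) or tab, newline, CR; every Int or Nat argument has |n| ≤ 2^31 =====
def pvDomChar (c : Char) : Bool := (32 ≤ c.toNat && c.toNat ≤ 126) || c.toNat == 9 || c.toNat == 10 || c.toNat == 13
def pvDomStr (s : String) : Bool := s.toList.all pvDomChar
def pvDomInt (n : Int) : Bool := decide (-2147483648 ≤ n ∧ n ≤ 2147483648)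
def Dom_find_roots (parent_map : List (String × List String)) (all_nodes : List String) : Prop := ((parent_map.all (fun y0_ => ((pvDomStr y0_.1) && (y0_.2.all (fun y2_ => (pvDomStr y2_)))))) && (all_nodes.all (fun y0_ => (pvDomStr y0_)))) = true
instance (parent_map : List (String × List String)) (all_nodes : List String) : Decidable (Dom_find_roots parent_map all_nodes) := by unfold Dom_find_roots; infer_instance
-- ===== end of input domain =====

-- B is edge-centric: it classifies every parent link once, derives the non-root set
-- from the present links, and obtains roots as the set-complement of the keys — an
-- alternative decomposition with the same cost as A's per-node loop.

-- ===== PORT A =====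
-- loop body of A, as a helper (one iteration of A's for-loop)
def find_rootsStep (all_nodes : List String) (acc : PySem.Set String × Int) (kv : String × List String) : PySem.Set String × Int :=
  if kv.2 = [] then (PySem.Set.add acc.1 kv.1, acc.2)
  else
    let present_parents : PySem.Set String :=
      PySem.Set.ofList (kv.2.filter (fun p => all_nodes.contains p))
    let missing : Int := acc.2 + ((kv.2.length : Int) - (present_parents.length : Int))
    if present_parents = [] then (PySem.Set.add acc.1 kv.1, missing)
    else (acc.1, missing)

def find_roots (parent_map : List (String × List String)) (all_nodes : List String) : List String × Int :=
  parent_map.foldl (find_rootsStep all_nodes) (PySem.Set.empty, 0)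

-- ===== PORT B =====
def find_roots_alt (parent_map : List (String × List String)) (all_nodes : List String) : List String × Int :=
  let edges : List (String × Bool) :=
    parent_map.flatMap (fun kv => kv.2.map (fun parent => (kv.1, all_nodes.contains parent)))
  let non_roots : PySem.Set String :=
    PySem.Set.ofList ((edges.filter (fun e => e.2)).map Prod.fst)
  let missing_parent_links : Int := ((edges.filter (fun e => !e.2)).length : Int)
  (PySem.Set.diff (PySem.Set.ofList (parent_map.map Prod.fst)) non_roots, missing_parent_links)

-- ===== PRECONDITION & SPEC =====
-- Under the type convention parent_map encodes a Python dict of sets: its keys are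
-- distinct and each parents list holds distinct elements; Pre_ states exactly that
-- representation invariant (no Python input violates it), nothing more.
def Pre_find_roots (parent_map : List (String × List String)) (all_nodes : List String) : Prop :=
  (parent_map.map Prod.fst).Nodup ∧ ∀ kv ∈ parent_map, kv.2.Nodup
instance (parent_map : List (String × List String)) (all_nodes : List String) : Decidable (Pre_find_roots parent_map all_nodes) := by unfold Pre_find_roots; infer_instance
def pvWitness_find_roots : (List (String × List String)) × List String :=
  ([("a", ["b"]), ("b", []), ("c", ["x", "y"])], ["a", "b", "c"])
def Spec_find_roots (parent_map : List (String × List String)) (all_nodes : List String) (out : List String × Int) : Prop := out = find_roots_alt parent_map all_nodes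
instance (parent_map : List (String × List String)) (all_nodes : List String) (out : List String × Int) : Decidable (Spec_find_roots parent_map all_nodes out) := by unfold Spec_find_roots; infer_instance

-- ===== CLAIM (what is proved, stated in full; the proofs are below) =====
def Claim_equal_find_roots : Prop := ∀ (parent_map : List (String × List String)) (all_nodes : List String), Dom_find_roots parent_map all_nodes → Pre_find_roots parent_map all_nodes → Spec_find_roots parent_map all_nodes (find_roots parent_map all_nodes)

-- ===== LEMMAS AND PROOFS =====

-- One iteration of A's loop, characterised: the node is added iff no parent is present,
-- and the counter grows by the number of absent parents (needs parents duplicate-free).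
theorem find_rootsStep_eq (all_nodes : List String) (acc : PySem.Set String × Int)
    (node : String) (parents : List String) (hnp : parents.Nodup) :
    find_rootsStep all_nodes acc (node, parents) =
      ((if parents.any (fun p => all_nodes.contains p) then acc.1 else PySem.Set.add acc.1 node),
       acc.2 + ((parents.filter (fun p => !(all_nodes.contains p))).length : Int)) := by
  unfold find_rootsStep
  by_cases hpe : parents = []
  · subst hpe; simp
  · simp only [if_neg hpe]
    rw [PySem.Set.ofList_eq_self_of_nodup _ (hnp.filter _)]
    have hlen : parents.length
        = (parents.filter (fun p => all_nodes.contains p)).length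
          + (parents.filter (fun p => !(all_nodes.contains p))).length := by
      simpa [List.countP_eq_length_filter]
        using List.length_eq_countP_add_countP (p := fun p => all_nodes.contains p) (l := parents)
    have hiff : (parents.filter (fun p => all_nodes.contains p) = [])
        ↔ (parents.any (fun p => all_nodes.contains p)) = false := by
      simp [List.filter_eq_nil_iff, List.any_eq_false]
    by_cases hany : (parents.any (fun p => all_nodes.contains p)) = true
    · have hf : ¬ parents.filter (fun p => all_nodes.contains p) = [] := by
        intro h
        rw [hiff.mp h] at hany
        exact Bool.false_ne_true hany
      simp only [if_neg hf, hany, if_pos, Prod.mk.injEq]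
      exact ⟨by trivial, by omega⟩
    · have hany' : (parents.any (fun p => all_nodes.contains p)) = false := by
        simpa using hany
      have hf : parents.filter (fun p => all_nodes.contains p) = [] := hiff.mpr hany'
      simp only [if_pos hf, hany', Bool.false_eq_true, if_false, Prod.mk.injEq]
      refine ⟨by trivial, ?_⟩
      rw [hf] at hlen ⊢
      simp only [List.length_nil] at hlen ⊢
      omega

-- Loop invariant for A's fold, generalised over the accumulator.
theorem find_roots_loop (all_nodes : List String) :
    ∀ (pm : List (String × List String)) (roots : PySem.Set String) (m : Int),
      (∀ kv ∈ pm, kv.2.Nodup) →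
      pm.foldl (find_rootsStep all_nodes) (roots, m)
      = (PySem.Set.update roots
           ((pm.filter (fun kv => !(kv.2.any (fun p => all_nodes.contains p)))).map Prod.fst),
         m + ((pm.flatMap (fun kv => kv.2.filter (fun p => !(all_nodes.contains p)))).length : Int)) := by
  intro pm
  induction pm with
  | nil => intro roots m _; simp
  | cons kv rest ih =>
    intro roots m hnd
    obtain ⟨node, parents⟩ := kv
    have hnp : parents.Nodup := hnd (node, parents) (List.mem_cons_self ..)
    have hrest : ∀ kv ∈ rest, kv.2.Nodup := fun kv h => hnd kv (List.mem_cons_of_mem _ h)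
    rw [List.foldl_cons, find_rootsStep_eq all_nodes (roots, m) node parents hnp]
    by_cases hany : (parents.any (fun p => all_nodes.contains p)) = true
    · rw [if_pos hany, ih roots _ hrest]
      simp only [List.filter_cons, List.flatMap_cons, List.length_append, hany,
        Bool.not_true, Bool.false_eq_true, if_false, Prod.mk.injEq]
      exact ⟨by trivial, by push_cast; ring⟩
    · have hany' : (parents.any (fun p => all_nodes.contains p)) = false := by simpa using hany
      rw [if_neg hany, ih (PySem.Set.add roots node) _ hrest]
      simp only [List.filter_cons, List.flatMap_cons, List.length_append, hany',
        Bool.not_false, if_true, List.map_cons, PySem.Set.update_cons, Prod.mk.injEq]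
      exact ⟨by trivial, by push_cast; ring⟩

-- Membership in B's non-root list, characterised through the flattened edges.
theorem mem_nonroots (all_nodes : List String) (pm : List (String × List String)) (x : String) :
    (x ∈ ((pm.flatMap (fun kv => kv.2.map (fun parent => (kv.1, all_nodes.contains parent)))).filter
            (fun e => e.2)).map Prod.fst)
    ↔ ∃ kv ∈ pm, kv.1 = x ∧ (kv.2.any (fun p => all_nodes.contains p)) = true := by
  simp only [List.mem_map, List.mem_filter, List.mem_flatMap, List.any_eq_true]
  constructor
  · rintro ⟨e, ⟨⟨kv, hkv, p, hp, rfl⟩, he2⟩, rfl⟩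
    exact ⟨kv, hkv, rfl, p, hp, he2⟩
  · rintro ⟨kv, hkv, rfl, p, hp, hc⟩
    exact ⟨(kv.1, all_nodes.contains p), ⟨⟨kv, hkv, p, hp, rfl⟩, hc⟩, rfl⟩

-- B's missing-link count equals A's (filter commutes with the flattening).
theorem missing_count_eq (all_nodes : List String) (pm : List (String × List String)) :
    ((pm.flatMap (fun kv => kv.2.map (fun parent => (kv.1, all_nodes.contains parent)))).filter
        (fun e => !e.2)).length
    = (pm.flatMap (fun kv => kv.2.filter (fun p => !(all_nodes.contains p)))).length := by
  rw [List.filter_flatMap]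
  simp only [List.length_flatMap, List.filter_map, List.length_map]
  rfl

-- ===== VERDICT (by name: the statement is the Claim_ definition above) =====
theorem find_roots_spec : Claim_equal_find_roots := by
  intro parent_map all_nodes _ hpre
  obtain ⟨hkeys, hpar⟩ := hpre
  unfold Spec_find_roots find_roots find_roots_alt
  rw [find_roots_loop all_nodes parent_map PySem.Set.empty 0 hpar]
  simp only [PySem.Set.update_nil_left, PySem.Set.empty, zero_add]
  refine Prod.ext ?_ ?_
  · -- roots: A's in-order root keys = keys minus the non-root set
    show PySem.Set.ofList
        ((parent_map.filter (fun kv => !(kv.2.any (fun p => all_nodes.contains p)))).map Prod.fst)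
      = PySem.Set.diff (PySem.Set.ofList (parent_map.map Prod.fst)) _
    have hRnd : ((parent_map.filter
        (fun kv => !(kv.2.any (fun p => all_nodes.contains p)))).map Prod.fst).Nodup := by
      exact List.Nodup.sublist (List.Sublist.map Prod.fst (List.filter_sublist)) hkeys
    rw [PySem.Set.ofList_eq_self_of_nodup _ hRnd,
        PySem.Set.ofList_eq_self_of_nodup _ hkeys]
    show _ = (parent_map.map Prod.fst).filter _
    rw [List.filter_map]
    refine congrArg _ (List.filter_congr ?_)
    intro kv hkv
    simp only [Function.comp]
    congr 1
    rw [Bool.eq_iff_iff, PySem.Set.contains_iff, PySem.Set.mem_ofList, mem_nonroots]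
    constructor
    · intro h; exact ⟨kv, hkv, rfl, h⟩
    · rintro ⟨kv', hkv', hfst, hany⟩
      have : kv' = kv := List.inj_on_of_nodup_map hkeys hkv' hkv hfst
      exact this ▸ hany
  · exact (congrArg Int.ofNat (missing_count_eq all_nodes parent_map)).symm
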